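-- pv_equiv track=rewrite | github.com/Harshvardhan-To1/IITISoC_24_CP | ChatBot/app.py | create_tag
-- ===== SOURCE A (Python) =====
-- def create_tag(output_lst):
--     str_tag = '<div class="d-flex justify-content-start mb-4"><div class="img_cont_msg"><img src="https://i.ibb.co/fSNP7Rz/icons8-chatgpt-512.png" class="rounded-circle user_img_msg"></div><div class="msg_cotainer">'
--     for i in range(len(output_lst)):
--         # $nbsp is one space
--         i_new = ""
--         for j in output_lst[i]:
--             if j==" ":
--                i_new += "&nbsp;"
--             elif j=="<":
--                i_new += "&lt;"
--             elif j==">":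
--                i_new += "&gt;"
--             elif j=="&":
--                i_new += "&amp;"
--             else:
--                i_new += j
--         str_tag += i_new + "<br>"
--     return str_tag
-- ===== SOURCE B (Python) =====
-- PREFIX = '<div class="d-flex justify-content-start mb-4"><div class="img_cont_msg"><img src="https://i.ibb.co/fSNP7Rz/icons8-chatgpt-512.png" class="rounded-circle user_img_msg"></div><div class="msg_cotainer">'
--
-- def _escape(s):
--     # staged whole-string passes; '&' must be rewritten first so the
--     # ampersands introduced by the later passes are not double-escaped
--     s = s.replace('&', '&amp;')
--     s = s.replace('<', '&lt;')
--     s = s.replace('>', '&gt;')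
--     s = s.replace(' ', '&nbsp;')
--     return s
--
-- def create_tag(output_lst):
--     return PREFIX + ''.join(_escape(s) + '<br>' for s in output_lst)
-- ===== Notes on version B (the rewrite author's own statement) =====
-- stated objective: idiomatic
-- what changed: Replaces A's single per-character if/elif scan with four staged whole-string str.replace passes (ampersand escaped first so later passes cannot double-escape) and a join instead of manual accumulation.
import Mathlib
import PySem

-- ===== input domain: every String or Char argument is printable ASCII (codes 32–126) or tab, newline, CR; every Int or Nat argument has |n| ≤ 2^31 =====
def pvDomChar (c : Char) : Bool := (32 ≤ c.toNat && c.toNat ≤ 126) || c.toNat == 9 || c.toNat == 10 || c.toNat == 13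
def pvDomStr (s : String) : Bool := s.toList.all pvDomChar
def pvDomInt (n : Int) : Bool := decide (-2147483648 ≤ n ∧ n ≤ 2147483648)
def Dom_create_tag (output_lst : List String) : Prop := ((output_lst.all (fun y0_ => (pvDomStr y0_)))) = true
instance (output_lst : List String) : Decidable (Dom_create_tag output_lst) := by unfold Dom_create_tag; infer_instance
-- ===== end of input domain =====

-- B replaces A's single per-character if/elif scan with four staged whole-string
-- replace passes ('&' first, so later passes cannot double-escape) plus a join
-- (idiomatic; same cost).

def pvPrefix : String := "<div class=\"d-flex justify-content-start mb-4\"><div class=\"img_cont_msg\"><img src=\"https://i.ibb.co/fSNP7Rz/icons8-chatgpt-512.png\" class=\"rounded-circle user_img_msg\"></div><div class=\"msg_cotainer\">"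

-- ===== PORT A =====
-- strings are carried as their List Char code points (exact for Python str)
def create_tag (output_lst : List String) : String :=
  String.ofList (output_lst.foldl (fun str_tag s =>
      str_tag ++
        ((s.toList.foldl (fun i_new j =>
            i_new ++
              (if j = ' ' then "&nbsp;".toList
               else if j = '<' then "&lt;".toList
               else if j = '>' then "&gt;".toList
               else if j = '&' then "&amp;".toList
               else [j])) ([] : List Char)) ++ "<br>".toList))
    pvPrefix.toList)

-- ===== PORT B =====
-- Source B's _escape: four staged s.replace passes, '&' first
def pvEscape (cs : List Char) : List Char :=
  PySem.Chars.replace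
    (PySem.Chars.replace
      (PySem.Chars.replace
        (PySem.Chars.replace cs "&".toList "&amp;".toList)
        "<".toList "&lt;".toList)
      ">".toList "&gt;".toList)
    " ".toList "&nbsp;".toList

def create_tag_alt (output_lst : List String) : String :=
  String.ofList (pvPrefix.toList ++
    (output_lst.map (fun s => pvEscape s.toList ++ "<br>".toList)).flatten)

-- ===== PRECONDITION & SPEC =====
def Spec_create_tag (output_lst : List String) (out : String) : Prop := out = create_tag_alt output_lst
instance (output_lst : List String) (out : String) : Decidable (Spec_create_tag output_lst out) := by unfold Spec_create_tag; infer_instance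

-- ===== CLAIM (what is proved, stated in full; the proofs are below) =====
def Claim_equal_create_tag : Prop := ∀ (output_lst : List String), Dom_create_tag output_lst → Spec_create_tag output_lst (create_tag output_lst)

-- ===== LEMMAS AND PROOFS =====

-- replace with a one-character pattern is a flatMap over the characters
theorem pv_go_single (a : Char) (r : List Char) :
    ∀ (l : List Char) (fuel : Nat) (acc : List Char), l.length ≤ fuel →
      PySem.Chars.replace.go [a] r fuel l acc
        = acc.reverse ++ l.flatMap (fun c => if c = a then r else [c])
  | [], 0, acc, _ => by simp [PySem.Chars.replace.go]
  | [], fuel + 1, acc, _ => by simp [PySem.Chars.replace.go]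
  | c :: t, fuel + 1, acc, h => by
      rw [PySem.Chars.replace.go]
      by_cases hc : c = a
      · have hp : ([a].isPrefixOf (c :: t)) = true := by simp [List.isPrefixOf, hc]
        rw [hp]
        simp only [if_true, List.length_cons, List.length_nil, List.drop_succ_cons, List.drop_zero]
        rw [pv_go_single a r t fuel _ (by simpa using h)]
        simp [hc]
      · have hp : ([a].isPrefixOf (c :: t)) = false := by
          simp [List.isPrefixOf]; exact fun hh => hc hh.symm
        rw [hp]
        simp only [if_false, Bool.false_eq_true]
        rw [pv_go_single a r t fuel _ (by simpa using h)]
        simp [hc]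

theorem pv_replace_single (a : Char) (r cs : List Char) :
    PySem.Chars.replace cs [a] r = cs.flatMap (fun c => if c = a then r else [c]) := by
  rw [PySem.Chars.replace]
  simp only [List.isEmpty_cons, if_false, Bool.false_eq_true]
  exact pv_go_single a r cs cs.length [] (le_refl _)

-- the four staged passes agree with A's if/elif chain on every string
theorem pv_escape_eq (cs : List Char) :
    pvEscape cs
      = cs.flatMap (fun j =>
          if j = ' ' then "&nbsp;".toList
          else if j = '<' then "&lt;".toList
          else if j = '>' then "&gt;".toList
          else if j = '&' then "&amp;".toList
          else [j]) := by
  unfold pvEscape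
  rw [show ("&".toList) = ['&'] from rfl, show ("<".toList) = ['<'] from rfl,
      show (">".toList) = ['>'] from rfl, show (" ".toList) = [' '] from rfl]
  rw [pv_replace_single, pv_replace_single, pv_replace_single, pv_replace_single]
  rw [List.flatMap_assoc, List.flatMap_assoc, List.flatMap_assoc]
  refine List.flatMap_congr ?_
  intro j _
  by_cases h1 : j = ' '
  · subst h1; decide
  · by_cases h2 : j = '<'
    · subst h2; decide
    · by_cases h3 : j = '>'
      · subst h3; decide
      · by_cases h4 : j = '&'
        · subst h4; decide
        · simp [h1, h2, h3, h4]

-- A's inner accumulation loop is the same flatMap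
theorem pv_inner_eq (cs : List Char) :
    (cs.foldl (fun i_new j =>
        i_new ++
          (if j = ' ' then "&nbsp;".toList
           else if j = '<' then "&lt;".toList
           else if j = '>' then "&gt;".toList
           else if j = '&' then "&amp;".toList
           else [j])) ([] : List Char)) = pvEscape cs := by
  rw [PySem.List.foldl_append_eq_flatMap, pv_escape_eq]
  simp [List.flatMap_def]

-- ===== VERDICT (by name: the statement is the Claim_ definition above) =====
theorem create_tag_spec : Claim_equal_create_tag := by
  intro output_lst _
  unfold Spec_create_tag create_tag create_tag_alt
  rw [PySem.List.foldl_append_eq_flatMap]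
  simp only [List.flatMap_def]
  have h :
      List.map (fun s : String =>
          (s.toList.foldl (fun i_new j =>
              i_new ++
                (if j = ' ' then "&nbsp;".toList
                 else if j = '<' then "&lt;".toList
                 else if j = '>' then "&gt;".toList
                 else if j = '&' then "&amp;".toList
                 else [j])) ([] : List Char)) ++ "<br>".toList) output_lst =
        List.map (fun s : String => pvEscape s.toList ++ "<br>".toList) output_lst :=
    List.map_congr_left (fun s _ => by rw [pv_inner_eq])
  rw [h]
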